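-- pv_equiv track=rewrite | github.com/deysantanu84/python-portfolio | problemSolving/deleteOne.py | deleteOne
-- ===== SOURCE A (Python) =====
-- from math import gcd
--
-- def deleteOne(A):
--     N = len(A)
--     prefixGCD = [0 for _ in range(N + 2)]
--     suffixGCD = [0 for _ in range(N + 2)]
--
--     prefixGCD[1] = A[0]
--     for i in range(2, N + 1):
--         prefixGCD[i] = gcd(prefixGCD[i - 1], A[i - 1])
--
--     suffixGCD[N] = A[N - 1]
--     for i in range(N - 1, 0, -1):
--         suffixGCD[i] = gcd(suffixGCD[i + 1], A[i - 1])
--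
--     result = max(suffixGCD[2], prefixGCD[N - 1])
--
--     for i in range(2, N):
--         result = max(result, gcd(prefixGCD[i - 1], suffixGCD[i + 1]))
--
--     return result
-- ===== SOURCE B (Python) =====
-- from math import gcd
--
-- def deleteOne(A):
--     best = 0
--     for i in range(len(A)):
--         g = 0
--         for j, x in enumerate(A):
--             if j != i:
--                 g = gcd(g, x)
--         best = max(best, g)
--     return best
-- ===== Notes on version B (the rewrite author's own statement) =====
-- stated objective: simpler
-- what changed: Replaced the prefix/suffix gcd arrays and three index loops with a direct two-loop scan: for each index i fold math.gcd over all other elements and keep the running max.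
-- intended difference: On two-element lists whose sum is negative, A returns the larger of the two raw elements (possibly negative, because its prefix/suffix slots hold raw values instead of gcds), while B returns the larger of the two absolute values, the gcd left after deleting the other element, which is the intended value. — e.g. on deleteOne([-4, -6]): A returns -4, B returns 6
import Mathlib
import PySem

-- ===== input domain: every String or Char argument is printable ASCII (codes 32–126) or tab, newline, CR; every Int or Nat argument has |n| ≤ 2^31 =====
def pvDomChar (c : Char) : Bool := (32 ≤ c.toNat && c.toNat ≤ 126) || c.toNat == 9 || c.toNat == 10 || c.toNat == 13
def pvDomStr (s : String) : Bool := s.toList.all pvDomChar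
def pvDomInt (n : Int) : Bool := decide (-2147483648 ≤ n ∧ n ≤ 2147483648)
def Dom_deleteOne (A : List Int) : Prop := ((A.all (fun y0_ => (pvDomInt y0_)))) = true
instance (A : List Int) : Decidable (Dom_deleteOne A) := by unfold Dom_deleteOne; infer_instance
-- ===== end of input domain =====

-- B replaces A's prefix/suffix gcd arrays by a plain quadratic "gcd of all other elements" scan (simpler, not faster).

-- ===== PORT A =====
-- math.gcd : nonnegative gcd of the absolute values (exact)
def pvGcd (a b : Int) : Int := (Int.gcd a b : Int)

-- prefixGCD array of A: [0]*（N+2), prefixGCD[1] = A[0], then the forward loop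
def pvPrefixArr (A : List Int) : List Int :=
  let N : Int := A.length
  let p0 := (PySem.List.pyRange 0 (N + 2) 1).map (fun _ => (0 : Int))
  let p1 := PySem.List.pySetD p0 1 (PySem.List.pyGetD A 0 0)
  (PySem.List.pyRange 2 (N + 1) 1).foldl
    (fun p i => PySem.List.pySetD p i
      (pvGcd (PySem.List.pyGetD p (i - 1) 0) (PySem.List.pyGetD A (i - 1) 0))) p1

-- suffixGCD array of A: [0]*(N+2), suffixGCD[N] = A[N-1], then the backward loop
def pvSuffixArr (A : List Int) : List Int :=
  let N : Int := A.length
  let s0 := (PySem.List.pyRange 0 (N + 2) 1).map (fun _ => (0 : Int))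
  let s1 := PySem.List.pySetD s0 N (PySem.List.pyGetD A (N - 1) 0)
  (PySem.List.pyRange (N - 1) 0 (-1)).foldl
    (fun s i => PySem.List.pySetD s i
      (pvGcd (PySem.List.pyGetD s (i + 1) 0) (PySem.List.pyGetD A (i - 1) 0))) s1

def deleteOne (A : List Int) : Int :=
  let N : Int := A.length
  let prefixGCD := pvPrefixArr A
  let suffixGCD := pvSuffixArr A
  let result := max (PySem.List.pyGetD suffixGCD 2 0) (PySem.List.pyGetD prefixGCD (N - 1) 0)
  (PySem.List.pyRange 2 N 1).foldl
    (fun r i => max r (pvGcd (PySem.List.pyGetD prefixGCD (i - 1) 0)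
                             (PySem.List.pyGetD suffixGCD (i + 1) 0))) result

-- ===== PORT B =====
def deleteOne_alt (A : List Int) : Int :=
  (PySem.List.pyRange 0 (A.length : Int) 1).foldl (fun best i =>
    let g := (PySem.List.enumerate A 0).foldl
      (fun g jx => if jx.1 ≠ i then pvGcd g jx.2 else g) 0
    max best g) 0

-- ===== PRECONDITION & SPEC =====
-- A raises IndexError on the empty list (it reads the first element); that is the only input it raises on.
def Pre_deleteOne (A : List Int) : Prop := A ≠ []
instance (A : List Int) : Decidable (Pre_deleteOne A) := by unfold Pre_deleteOne; infer_instance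
def pvWitness_deleteOne : List Int := [6, 4, 10]

-- On two-element lists whose sum is negative, A returns the larger of the two raw elements (possibly
-- negative, because its prefix/suffix slots hold raw values instead of gcds), while B returns the larger
-- of the two absolute values — the gcd left after deleting the other element — which is the intended value.
def D_deleteOne (A : List Int) : Prop := A.length = 2 ∧ A.getD 0 0 + A.getD 1 0 < 0
instance (A : List Int) : Decidable (D_deleteOne A) := by unfold D_deleteOne; infer_instance
def Spec_deleteOne (A : List Int) (out : Int) : Prop := ¬ D_deleteOne A → out = deleteOne_alt A
instance (A : List Int) (out : Int) : Decidable (Spec_deleteOne A out) := by unfold Spec_deleteOne; infer_instance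
def pvDiffWitness_deleteOne : List Int := [-4, -6]
def pvDiffWitnessOut_deleteOne : Int × Int := (-4, 6)

-- ===== CLAIM (what is proved, stated in full; the proofs are below) =====
def Claim_unchanged_deleteOne : Prop := ∀ (A : List Int), Dom_deleteOne A → Pre_deleteOne A → Spec_deleteOne A (deleteOne A)
def Claim_changed_deleteOne : Prop := Dom_deleteOne (pvDiffWitness_deleteOne) ∧ Pre_deleteOne (pvDiffWitness_deleteOne) ∧ D_deleteOne (pvDiffWitness_deleteOne) ∧ deleteOne (pvDiffWitness_deleteOne) = pvDiffWitnessOut_deleteOne.1 ∧ deleteOne_alt (pvDiffWitness_deleteOne) = pvDiffWitnessOut_deleteOne.2 ∧ pvDiffWitnessOut_deleteOne.1 ≠ pvDiffWitnessOut_deleteOne.2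
def Claim_exact_deleteOne : Prop := ∀ (A : List Int), Dom_deleteOne A → Pre_deleteOne A → D_deleteOne A → deleteOne A ≠ deleteOne_alt A

-- ===== LEMMAS AND PROOFS =====

-- gcd-fold notation used by the proofs
def pvF (l : List Int) : Int := l.foldl pvGcd 0
def pvPf (A : List Int) (k : Nat) : Int := pvF (A.take k)
def pvSf (A : List Int) (k : Nat) : Int := pvF (A.drop k)
def pvE (A : List Int) (k : Nat) : Int := (A.eraseIdx k).foldl pvGcd 0

theorem pvGcd_eq (a b : Int) : pvGcd a b = (Nat.gcd a.natAbs b.natAbs : Int) := rfl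

theorem pvGcd_comm (a b : Int) : pvGcd a b = pvGcd b a := by
  simp [pvGcd_eq, Nat.gcd_comm]

theorem pvGcd_assoc (a b c : Int) : pvGcd (pvGcd a b) c = pvGcd a (pvGcd b c) := by
  simp [pvGcd_eq, Nat.gcd_assoc]

theorem pvGcd_zero_left_cancel (a b : Int) : pvGcd (pvGcd 0 a) b = pvGcd a b := by
  simp [pvGcd_eq, Int.natAbs_abs]

theorem pvGcd_nonneg (a b : Int) : 0 ≤ pvGcd a b := by
  simp [pvGcd_eq]

theorem pvGcd_zero_of_nonneg (a : Int) (h : 0 ≤ a) : pvGcd 0 a = a := by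
  simp [pvGcd_eq]; omega

theorem pvGcd_zero_right_cancel (c a : Int) : pvGcd c (pvGcd 0 a) = pvGcd c a := by
  simp [pvGcd_eq, Int.natAbs_abs]

-- foldl pvGcd c l = pvGcd c (pvF l) for nonnegative accumulators
theorem foldl_pvGcd_eq (l : List Int) (c : Int) (hc : 0 ≤ c) :
    l.foldl pvGcd c = pvGcd c (pvF l) := by
  induction l generalizing c with
  | nil => simp [pvF, pvGcd_eq]; rw [abs_of_nonneg hc]
  | cons a t ih =>
    show List.foldl pvGcd (pvGcd c a) t = pvGcd c (pvF (a :: t))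
    rw [ih _ (pvGcd_nonneg _ _)]
    have h2 : pvF (a :: t) = pvGcd (pvGcd 0 a) (pvF t) := by
      show List.foldl pvGcd (pvGcd 0 a) t = _
      rw [ih _ (pvGcd_nonneg _ _)]
    rw [h2, ← pvGcd_assoc, pvGcd_zero_right_cancel]

theorem pvF_nonneg (l : List Int) : 0 ≤ pvF l := by
  cases l with
  | nil => simp [pvF]
  | cons a t =>
    show 0 ≤ List.foldl pvGcd (pvGcd 0 a) t
    rw [foldl_pvGcd_eq _ _ (pvGcd_nonneg _ _)]; exact pvGcd_nonneg _ _

theorem pvPf_rec (A : List Int) (k : Nat) (h : k < A.length) :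
    pvPf A (k + 1) = pvGcd (pvPf A k) (A.getD k 0) := by
  unfold pvPf pvF
  rw [List.take_add_one, List.getElem?_eq_getElem h, Option.toList_some, List.foldl_append]
  simp [List.getD_eq_getElem?_getD, List.getElem?_eq_getElem h]

theorem pvSf_rec (A : List Int) (k : Nat) (h : k < A.length) :
    pvSf A k = pvGcd (pvSf A (k + 1)) (A.getD k 0) := by
  unfold pvSf pvF
  rw [List.drop_eq_getElem_cons h]
  show List.foldl pvGcd (pvGcd 0 A[k]) (A.drop (k+1)) = _
  rw [foldl_pvGcd_eq _ _ (pvGcd_nonneg _ _), pvGcd_zero_left_cancel, pvGcd_comm]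
  simp [List.getD_eq_getElem?_getD, List.getElem?_eq_getElem h]
  rfl

theorem pvE_eq (A : List Int) (k : Nat) : pvE A k = pvGcd (pvPf A k) (pvSf A (k + 1)) := by
  unfold pvE pvPf pvSf
  rw [List.eraseIdx_eq_take_drop_succ, List.foldl_append]
  rw [show List.foldl pvGcd 0 (A.take k) = pvF (A.take k) from rfl,
      foldl_pvGcd_eq _ _ (pvF_nonneg _)]

theorem pvE_nonneg (A : List Int) (k : Nat) : 0 ≤ pvE A k := by
  rw [pvE_eq]; exact pvGcd_nonneg _ _

-- running max pulls out of the accumulator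
theorem foldl_max_pull {α : Type} (f : α → Int) (l : List α) (c d : Int) :
    l.foldl (fun b x => max b (f x)) (max c d) = max c (l.foldl (fun b x => max b (f x)) d) := by
  induction l generalizing d with
  | nil => simp
  | cons a t ih =>
    show List.foldl _ (max (max c d) (f a)) t = max c (List.foldl _ (max d (f a)) t)
    rw [max_assoc, ih]

-- inner enumerate fold of B
theorem enum_fold_eq (l : List Int) (s i c : Int) :
    (PySem.List.enumerate l s).foldl (fun g jx => if jx.1 ≠ i then pvGcd g jx.2 else g) c
    = if s ≤ i ∧ i < s + l.length then (l.eraseIdx (i - s).toNat).foldl pvGcd c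
      else l.foldl pvGcd c := by
  induction l generalizing s c with
  | nil => simp [PySem.List.enumerate_nil]
  | cons a t ih =>
    rw [PySem.List.enumerate_cons]
    show (PySem.List.enumerate t (s+1)).foldl _ (if s ≠ i then pvGcd c a else c) = _
    by_cases hsi : s = i
    · subst hsi
      simp only [ne_eq, not_true_eq_false, if_false, ih]
      have h1 : ¬ (s + 1 ≤ s ∧ s < s + 1 + t.length) := by omega
      have h2 : s ≤ s ∧ s < s + (a :: t).length := by push_cast [List.length_cons]; omega
      rw [if_neg h1, if_pos h2]
      have : (s - s).toNat = 0 := by omega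
      rw [this, List.eraseIdx_cons_zero]
    · simp only [ne_eq, hsi, not_false_eq_true, if_true, ih]
      by_cases hr : s + 1 ≤ i ∧ i < s + 1 + t.length
      · have h2 : s ≤ i ∧ i < s + (a :: t).length := by push_cast [List.length_cons]; omega
        rw [if_pos hr, if_pos h2]
        have hk : (i - s).toNat = (i - (s+1)).toNat + 1 := by omega
        rw [hk, List.eraseIdx_cons_succ, List.foldl_cons]
      · have h2 : ¬ (s ≤ i ∧ i < s + (a :: t).length) := by
          simp only [List.length_cons] at *
          push_cast at *
          omega
        rw [if_neg hr, if_neg h2, List.foldl_cons]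

-- B computes the running max of pvE
theorem alt_eq (A : List Int) :
    deleteOne_alt A = (List.range A.length).foldl (fun b k => max b (pvE A k)) 0 := by
  unfold deleteOne_alt
  rw [PySem.List.pyRange_zero_nat, List.foldl_map]
  apply PySem.List.foldl_congr_mem
  intro acc k hk
  simp only [List.mem_range] at hk
  show max acc ((PySem.List.enumerate A 0).foldl
      (fun g jx => if jx.1 ≠ ((k:Nat):Int) then pvGcd g jx.2 else g) 0) = max acc (pvE A k)
  rw [enum_fold_eq]
  rw [if_pos (by constructor <;> [omega; (push_cast; omega)])]
  rw [show (((k:Nat):Int) - 0).toNat = k from by omega]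
  rfl

theorem getD_set (l : List Int) (m j : Nat) (v : Int) :
    (l.set m v).getD j 0 = if j = m ∧ m < l.length then v else l.getD j 0 := by
  simp only [List.getD_eq_getElem?_getD, List.getElem?_set]
  split_ifs with h1 h2 h3 <;> simp_all

theorem zeros_getD (l : List Int) (j : Nat) :
    (l.map (fun _ => (0:Int))).getD j 0 = 0 := by
  induction l generalizing j with
  | nil => simp
  | cons a t _ => cases j <;> simp

theorem zeros_len (A : List Int) :
    ((PySem.List.pyRange 0 ((A.length:Int) + 2)).map (fun _ => (0:Int))).length = A.length + 2 := by
  rw [List.length_map, PySem.List.length_pyRange_one]; omega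

-- the prefix loop body
def pvPStep (A : List Int) (p : List Int) (i : Int) : List Int :=
  PySem.List.pySetD p i (pvGcd (PySem.List.pyGetD p (i - 1) 0) (PySem.List.pyGetD A (i - 1) 0))

-- the suffix loop body
def pvSStep (A : List Int) (s : List Int) (i : Int) : List Int :=
  PySem.List.pySetD s i (pvGcd (PySem.List.pyGetD s (i + 1) 0) (PySem.List.pyGetD A (i - 1) 0))

theorem prefix_init_getD (A : List Int) (j : Nat) :
    (PySem.List.pySetD ((PySem.List.pyRange 0 ((A.length:Int) + 2)).map (fun _ => (0:Int))) 1
      (PySem.List.pyGetD A 0 0)).getD j 0 = if j = 1 then A.getD 0 0 else 0 := by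
  rw [PySem.List.pySetD_of_nonneg _ _ (by omega), PySem.List.pyGetD_zero]
  have h1 : ((1:Int)).toNat = 1 := rfl
  rw [h1, getD_set, zeros_len]
  split_ifs with h2 h3 <;> first | rfl | (exfalso; omega) | exact zeros_getD _ _

theorem prefix_inv (A : List Int) (m : Nat) (h2 : 2 ≤ m) (hm : m ≤ A.length + 1) :
    ((PySem.List.pyRange 2 (m:Int)).foldl (pvPStep A)
      (PySem.List.pySetD ((PySem.List.pyRange 0 ((A.length:Int) + 2)).map (fun _ => (0:Int))) 1
        (PySem.List.pyGetD A 0 0))).length = A.length + 2 ∧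
    ∀ j : Nat, ((PySem.List.pyRange 2 (m:Int)).foldl (pvPStep A)
      (PySem.List.pySetD ((PySem.List.pyRange 0 ((A.length:Int) + 2)).map (fun _ => (0:Int))) 1
        (PySem.List.pyGetD A 0 0))).getD j 0 =
      (if j = 1 then A.getD 0 0 else if 2 ≤ j ∧ j < m then pvPf A j else 0) := by
  induction m, h2 using Nat.le_induction with
  | base =>
    rw [show PySem.List.pyRange 2 (((2:Nat)):Int) = [] from PySem.List.pyRange_one_eq_nil (by omega)]
    constructor
    · simp only [List.foldl_nil]
      rw [PySem.List.pySetD_of_nonneg _ _ (by omega), List.length_set, zeros_len]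
    · intro j
      simp only [List.foldl_nil, prefix_init_getD]
      split_ifs <;> first | rfl | omega
  | succ m h2 ih =>
    obtain ⟨hlen, hget⟩ := ih (by omega)
    have hcast : (((m+1 : Nat)):Int) = ((m:Int) + 1) := by omega
    rw [hcast, PySem.List.pyRange_one_succ_right (by omega), List.foldl_append, List.foldl_cons,
        List.foldl_nil]
    set L := (PySem.List.pyRange 2 (m:Int)).foldl (pvPStep A)
      (PySem.List.pySetD ((PySem.List.pyRange 0 ((A.length:Int) + 2)).map (fun _ => (0:Int))) 1
        (PySem.List.pyGetD A 0 0)) with hL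
    have e1 : ((m:Int)) - 1 = (((m-1 : Nat)):Int) := by omega
    have hval : pvGcd (PySem.List.pyGetD L ((m:Int) - 1) 0) (PySem.List.pyGetD A ((m:Int) - 1) 0)
        = pvPf A m := by
      rw [e1, PySem.List.pyGetD_natCast, PySem.List.pyGetD_natCast, hget (m-1)]
      by_cases hm2 : m = 2
      · subst hm2
        rw [show ((2:Nat) - 1) = 1 from rfl, if_pos rfl]
        have h5 : pvPf A 2 = pvGcd (pvGcd 0 (A.getD 0 0)) (A.getD 1 0) := by
          rw [show (2:Nat) = 1 + 1 from rfl, pvPf_rec A 1 (by omega),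
              show (1:Nat) = 0 + 1 from rfl, pvPf_rec A 0 (by omega)]
          rfl
        rw [h5, pvGcd_zero_left_cancel]
      · rw [if_neg (by omega), if_pos (by omega)]
        rw [show m = (m - 1) + 1 from by omega, pvPf_rec A (m-1) (by omega)]
        rw [show m - 1 + 1 - 1 = m - 1 from by omega]
    have hset : pvPStep A L ((m:Int)) = L.set m (pvPf A m) := by
      rw [show pvPStep A L ((m:Int)) = PySem.List.pySetD L ((m:Int))
        (pvGcd (PySem.List.pyGetD L ((m:Int) - 1) 0) (PySem.List.pyGetD A ((m:Int) - 1) 0)) from rfl]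
      rw [hval, PySem.List.pySetD_of_nonneg _ _ (by omega)]
      rw [show ((m:Int)).toNat = m from by omega]
    rw [hset]
    constructor
    · rw [List.length_set]; exact hlen
    · intro j
      rw [getD_set, hlen, hget j]
      by_cases hj : j = m
      · subst hj
        rw [if_pos ⟨rfl, by omega⟩, if_neg (by omega), if_pos (by omega)]
      · rw [if_neg (by simp [hj])]
        split_ifs <;> first | rfl | omega

-- prefix array characterisation
theorem prefixArr_getD (A : List Int) (hA : A ≠ []) (j : Nat) :
    (pvPrefixArr A).getD j 0 =
      (if j = 1 then A.getD 0 0 else if 2 ≤ j ∧ j ≤ A.length then pvPf A j else 0) := by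
  have hN : 1 ≤ A.length := List.length_pos_of_ne_nil hA
  have e : pvPrefixArr A = (PySem.List.pyRange 2 ((A.length:Int) + 1)).foldl (pvPStep A)
      (PySem.List.pySetD ((PySem.List.pyRange 0 ((A.length:Int) + 2)).map (fun _ => (0:Int))) 1
        (PySem.List.pyGetD A 0 0)) := rfl
  have hcast : ((A.length:Int) + 1) = (((A.length + 1 : Nat)):Int) := by omega
  rw [e, hcast, (prefix_inv A (A.length + 1) (by omega) (by omega)).2 j]
  split_ifs <;> first | rfl | omega

theorem pvSf_len (A : List Int) : pvSf A A.length = 0 := by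
  unfold pvSf pvF
  rw [List.drop_length]
  rfl

theorem suffix_init_getD (A : List Int) (hA : A ≠ []) (j : Nat) :
    (PySem.List.pySetD ((PySem.List.pyRange 0 ((A.length:Int) + 2)).map (fun _ => (0:Int)))
      ((A.length:Int)) (PySem.List.pyGetD A (((A.length - 1 : Nat)):Int) 0)).getD j 0
    = if j = A.length then A.getD (A.length - 1) 0 else 0 := by
  have hN : 1 ≤ A.length := List.length_pos_of_ne_nil hA
  rw [PySem.List.pyGetD_natCast, PySem.List.pySetD_natCast, getD_set, zeros_len]
  split_ifs <;> first | rfl | omega | exact zeros_getD _ _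

theorem suffix_gen (A : List Int) (_hA : A ≠ []) (m : Nat) (hm : m + 1 ≤ A.length) :
    ∀ L0 : List Int, L0.length = A.length + 2 →
    (∀ j : Nat, L0.getD j 0 = if j = A.length then A.getD (A.length - 1) 0
        else if m + 1 ≤ j ∧ j + 1 ≤ A.length then pvSf A (j - 1) else 0) →
    ((PySem.List.pyRange (m:Int) 0 (-1)).foldl (pvSStep A) L0).length = A.length + 2 ∧
    ∀ j : Nat, ((PySem.List.pyRange (m:Int) 0 (-1)).foldl (pvSStep A) L0).getD j 0 =
      (if j = A.length then A.getD (A.length - 1) 0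
       else if 1 ≤ j ∧ j + 1 ≤ A.length then pvSf A (j - 1) else 0) := by
  induction m with
  | zero =>
    intro L0 hlen hget
    rw [PySem.List.pyRange_neg_one_eq_nil (by omega)]
    exact ⟨hlen, fun j => hget j⟩
  | succ m ih =>
    intro L0 hlen hget
    rw [show (((m+1 : Nat)):Int) = ((m:Int) + 1) from by omega,
        PySem.List.pyRange_neg_one_cons (by omega), List.foldl_cons,
        show ((m:Int) + 1 - 1) = ((m:Nat):Int) from by omega]
    have hval : pvGcd (PySem.List.pyGetD L0 ((m:Int) + 1 + 1) 0)
        (PySem.List.pyGetD A ((m:Int) + 1 - 1) 0) = pvSf A m := by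
      rw [show ((m:Int) + 1 + 1) = (((m+2 : Nat)):Int) from by omega,
          show ((m:Int) + 1 - 1) = ((m:Nat):Int) from by omega,
          PySem.List.pyGetD_natCast, PySem.List.pyGetD_natCast, hget (m+2)]
      by_cases hend : m + 2 = A.length
      · rw [if_pos hend]
        rw [show A.length - 1 = m + 1 from by omega]
        rw [pvSf_rec A m (by omega), pvSf_rec A (m+1) (by omega),
            show m + 1 + 1 = A.length from by omega, pvSf_len, pvGcd_zero_left_cancel]
      · rw [if_neg (by omega), if_pos (by omega),
            show m + 2 - 1 = m + 1 from by omega, pvSf_rec A m (by omega)]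
    have hstep : pvSStep A L0 ((m:Int) + 1) = L0.set (m+1) (pvSf A m) := by
      rw [show pvSStep A L0 ((m:Int) + 1) = PySem.List.pySetD L0 ((m:Int) + 1)
          (pvGcd (PySem.List.pyGetD L0 ((m:Int) + 1 + 1) 0)
                 (PySem.List.pyGetD A ((m:Int) + 1 - 1) 0)) from rfl,
          hval, PySem.List.pySetD_of_nonneg _ _ (by omega),
          show ((m:Int) + 1).toNat = m + 1 from by omega]
    rw [hstep]
    apply ih (by omega)
    · rw [List.length_set]; exact hlen
    · intro j
      rw [getD_set, hlen, hget j]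
      by_cases hj : j = m + 1
      · subst hj
        rw [if_pos ⟨rfl, by omega⟩, if_neg (by omega), if_pos (by omega)]
        congr 1
      · rw [if_neg (by simp [hj])]
        split_ifs <;> first | rfl | omega

-- suffix array characterisation
theorem suffixArr_getD (A : List Int) (hA : A ≠ []) (j : Nat) :
    (pvSuffixArr A).getD j 0 =
      (if j = A.length then A.getD (A.length - 1) 0
       else if 1 ≤ j ∧ j + 1 ≤ A.length then pvSf A (j - 1) else 0) := by
  have hN : 1 ≤ A.length := List.length_pos_of_ne_nil hA
  have e : pvSuffixArr A = (PySem.List.pyRange ((A.length:Int) - 1) 0 (-1)).foldl (pvSStep A)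
      (PySem.List.pySetD ((PySem.List.pyRange 0 ((A.length:Int) + 2)).map (fun _ => (0:Int)))
        ((A.length:Int)) (PySem.List.pyGetD A ((A.length:Int) - 1) 0)) := rfl
  rw [e, show ((A.length:Int) - 1) = (((A.length - 1 : Nat)):Int) from by omega]
  -- the cast rewrite above also normalised the index inside the initial array
  refine (suffix_gen A hA (A.length - 1) (by omega) _ ?_ ?_).2 j
  · rw [PySem.List.pySetD_natCast, List.length_set, zeros_len]
  · intro j'
    rw [suffix_init_getD A hA j']
    split_ifs <;> first | rfl | omega

theorem pvPf_nonneg (A : List Int) (k : Nat) : 0 ≤ pvPf A k := pvF_nonneg _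

theorem pvSf_nonneg (A : List Int) (k : Nat) : 0 ≤ pvSf A k := pvF_nonneg _

theorem pvGcd_zero_right (a : Int) (h : 0 ≤ a) : pvGcd a 0 = a := by
  rw [pvGcd_comm]; exact pvGcd_zero_of_nonneg a h

theorem pvPf_one (A : List Int) (h : 0 < A.length) : pvPf A 1 = pvGcd 0 (A.getD 0 0) := by
  rw [show (1:Nat) = 0 + 1 from rfl, pvPf_rec A 0 h]
  rfl

theorem pvSf_last (A : List Int) (h : 0 < A.length) :
    pvSf A (A.length - 1) = pvGcd 0 (A.getD (A.length - 1) 0) := by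
  rw [show A.length - 1 = (A.length - 1) + 1 - 1 from by omega,
      pvSf_rec A (A.length - 1 + 1 - 1) (by omega),
      show A.length - 1 + 1 - 1 + 1 = A.length from by omega, pvSf_len]

theorem pvE_zero (A : List Int) : pvE A 0 = pvSf A 1 := by
  rw [pvE_eq, show pvPf A 0 = 0 from rfl]
  exact pvGcd_zero_of_nonneg _ (pvSf_nonneg A 1)

theorem pvE_last (A : List Int) (hA : A ≠ []) : pvE A (A.length - 1) = pvPf A (A.length - 1) := by
  have hN : 1 ≤ A.length := List.length_pos_of_ne_nil hA
  rw [pvE_eq, show A.length - 1 + 1 = A.length from by omega, pvSf_len,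
      pvGcd_zero_right _ (pvPf_nonneg A _)]

-- A, written with its arrays characterised (the common first step of the final proofs)
theorem deleteOne_shape (A : List Int) (hA : A ≠ []) :
    deleteOne A = (PySem.List.pyRange 2 ((A.length:Int))).foldl
      (fun r i => max r (pvGcd (PySem.List.pyGetD (pvPrefixArr A) (i - 1) 0)
                              (PySem.List.pyGetD (pvSuffixArr A) (i + 1) 0)))
      (max (if 2 = A.length then A.getD (A.length - 1) 0
            else if 1 ≤ 2 ∧ 2 + 1 ≤ A.length then pvSf A (2 - 1) else 0)
           (if A.length - 1 = 1 then A.getD 0 0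
            else if 2 ≤ A.length - 1 ∧ A.length - 1 ≤ A.length then pvPf A (A.length - 1) else 0)) := by
  have hN : 1 ≤ A.length := List.length_pos_of_ne_nil hA
  have e : deleteOne A = (PySem.List.pyRange 2 ((A.length:Int))).foldl
      (fun r i => max r (pvGcd (PySem.List.pyGetD (pvPrefixArr A) (i - 1) 0)
                              (PySem.List.pyGetD (pvSuffixArr A) (i + 1) 0)))
      (max (PySem.List.pyGetD (pvSuffixArr A) 2 0)
           (PySem.List.pyGetD (pvPrefixArr A) ((A.length:Int) - 1) 0)) := rfl
  rw [e, show ((A.length:Int) - 1) = (((A.length - 1 : Nat)):Int) from by omega,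
      show ((2:Int)) = (((2:Nat)):Int) from rfl,
      PySem.List.pyGetD_natCast, PySem.List.pyGetD_natCast,
      suffixArr_getD A hA 2, prefixArr_getD A hA (A.length - 1)]

theorem pvGcd_pf (A : List Int) (j : Nat) (h1 : 1 ≤ j) (hj : j ≤ A.length) (y : Int) :
    pvGcd (if j = 1 then A.getD 0 0 else if 2 ≤ j ∧ j ≤ A.length then pvPf A j else 0) y
    = pvGcd (pvPf A j) y := by
  by_cases hj1 : j = 1
  · subst hj1
    rw [if_pos rfl, pvPf_one A (by omega), pvGcd_zero_left_cancel]
  · rw [if_neg hj1, if_pos ⟨by omega, hj⟩]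

theorem pvGcd_sf (A : List Int) (j : Nat) (h1 : 1 ≤ j) (hj : j ≤ A.length) (x : Int) :
    pvGcd x (if j = A.length then A.getD (A.length - 1) 0
             else if 1 ≤ j ∧ j + 1 ≤ A.length then pvSf A (j - 1) else 0)
    = pvGcd x (pvSf A (j - 1)) := by
  by_cases hjN : j = A.length
  · subst hjN
    rw [if_pos rfl, pvSf_last A (by omega), pvGcd_zero_right_cancel]
  · rw [if_neg hjN, if_pos ⟨h1, by omega⟩]

-- the two-element case, fully evaluated on both sides
theorem two_values (A : List Int) (h2 : A.length = 2) :
    deleteOne A = max (A.getD 1 0) (A.getD 0 0) ∧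
    deleteOne_alt A = max (max 0 (((A.getD 1 0).natAbs : Int))) (((A.getD 0 0).natAbs : Int)) := by
  have hne : A ≠ [] := by intro h; rw [h] at h2; simp at h2
  constructor
  · rw [deleteOne_shape A hne, h2,
        show PySem.List.pyRange 2 (((2:Nat)):Int) = [] from PySem.List.pyRange_one_eq_nil (by omega),
        List.foldl_nil, if_pos rfl, if_pos (by omega), show (2:Nat) - 1 = 1 from rfl]
  · have eSf : pvSf A 2 = 0 := h2 ▸ pvSf_len A
    rw [alt_eq A, h2, show List.range 2 = [0, 1] from rfl, List.foldl_cons, List.foldl_cons,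
        List.foldl_nil, pvE_zero, pvE_eq, pvSf_rec A 1 (by omega),
        show (1:Nat) + 1 = 2 from rfl, eSf, pvPf_one A (by omega)]
    simp only [pvGcd_eq, Int.natAbs_zero, Nat.gcd_zero_left, Nat.gcd_zero_right, Int.natAbs_natCast]

-- ===== VERDICT (by name: the statement is the Claim_ definition above) =====
theorem deleteOne_spec : Claim_unchanged_deleteOne := by
  intro A hDom hPre hnD
  show deleteOne A = deleteOne_alt A
  have hN : 1 ≤ A.length := List.length_pos_of_ne_nil hPre
  by_cases h1 : A.length = 1
  · -- N = 1
    rw [deleteOne_shape A hPre, alt_eq A, h1]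
    rw [show PySem.List.pyRange 2 (((1:Nat)):Int) = [] from PySem.List.pyRange_one_eq_nil (by omega),
        List.foldl_nil]
    rw [if_neg (by omega), if_neg (by omega), if_neg (by omega), if_neg (by omega)]
    rw [show List.range 1 = [0] from rfl, List.foldl_cons, List.foldl_nil,
        pvE_zero, show pvSf A 1 = pvF (A.drop 1) from rfl,
        List.drop_of_length_le (by omega)]
    rfl
  · by_cases h2 : A.length = 2
    · -- N = 2 (the non-excluded part: the two entries sum to ≥ 0)
      obtain ⟨e1, e2⟩ := two_values A h2
      have hs : 0 ≤ A.getD 0 0 + A.getD 1 0 := by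
        by_contra hlt
        exact hnD ⟨h2, by omega⟩
      rw [e1, e2]
      omega
    · -- N ≥ 3
      have h3 : 3 ≤ A.length := by omega
      rw [deleteOne_shape A hPre, alt_eq A]
      rw [if_neg (by omega), if_pos (by omega), if_neg (by omega), if_pos (by omega)]
      rw [show (2:Nat) - 1 = 1 from rfl, ← pvE_zero, ← pvE_last A hPre]
      -- rewrite A's loop as a fold of pvE over range (N-2)
      rw [PySem.List.pyRange_one, show (((A.length:Int)) - 2).toNat = A.length - 2 from by omega,
          List.foldl_map]
      have hcong := PySem.List.foldl_congr_mem (List.range (A.length - 2))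
        (fun r (k : Nat) => max r (pvGcd
          (PySem.List.pyGetD (pvPrefixArr A) (2 + (k:Int) - 1) 0)
          (PySem.List.pyGetD (pvSuffixArr A) (2 + (k:Int) + 1) 0)))
        (fun r (k : Nat) => max r (pvE A (k + 1)))
        (max (pvE A 0) (pvE A (A.length - 1)))
        (by
          intro acc k hk
          simp only [List.mem_range] at hk
          show max acc (pvGcd (PySem.List.pyGetD (pvPrefixArr A) (2 + (k:Int) - 1) 0)
              (PySem.List.pyGetD (pvSuffixArr A) (2 + (k:Int) + 1) 0)) = max acc (pvE A (k + 1))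
          congr 1
          rw [show ((2:Int) + (k:Int) - 1) = (((k + 1 : Nat)):Int) from by omega,
              show ((2:Int) + (k:Int) + 1) = (((k + 3 : Nat)):Int) from by omega,
              PySem.List.pyGetD_natCast, PySem.List.pyGetD_natCast,
              prefixArr_getD A hPre (k + 1), suffixArr_getD A hPre (k + 3),
              pvGcd_pf A (k + 1) (by omega) (by omega),
              pvGcd_sf A (k + 3) (by omega) (by omega),
              show k + 3 - 1 = (k + 1) + 1 from by omega, ← pvE_eq])
      rw [hcong]
      -- rewrite B's fold over range N, splitting off the first and the last index
      conv_rhs =>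
        rw [show List.range A.length = List.range ((A.length - 2) + 1 + 1) from by congr 1; omega,
            List.range_succ, List.foldl_append, List.foldl_cons, List.foldl_nil,
            List.range_succ_eq_map, List.foldl_cons, List.foldl_map]
      simp only [Nat.succ_eq_add_one]
      rw [max_eq_right (pvE_nonneg A 0)]
      rw [show (A.length - 2) + 1 = A.length - 1 from by omega]
      rw [max_comm (pvE A 0) (pvE A (A.length - 1)),
          foldl_max_pull (fun k => pvE A (k + 1)) (List.range (A.length - 2))
            (pvE A (A.length - 1)) (pvE A 0),
          max_comm]

theorem deleteOne_changed : Claim_changed_deleteOne := by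
  unfold Claim_changed_deleteOne; decide

theorem deleteOne_tight : Claim_exact_deleteOne := by
  intro A hDom hPre hD
  obtain ⟨h2, hsum⟩ := hD
  obtain ⟨e1, e2⟩ := two_values A h2
  rw [e1, e2]
  omega
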